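-- pv_equiv track=rewrite | github.com/bluekms/PythonStudy | Programmers/Lv1 명예의 전당(1).py | solution
-- ===== SOURCE A (Python) =====
-- def solution(k, score):
--     answer = []
--     rankingScore = []
--     for s in score:
--         if len(rankingScore) < k:
--             rankingScore.append(s)
--             answer.append(min(rankingScore))
--         else:
--             rankingScore.append(s)
--             rankingScore.remove(min(rankingScore))
--             answer.append(min(rankingScore))
--     return answer
-- ===== SOURCE B (Python) =====
-- def solution(k, score):
--     # Running minimum of the k highest scores so far: keep a sorted (ascending)
--     # list of at most k top scores; binary-search the insertion point, drop the
--     # smallest when over capacity; the answer each step is the first element.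
--     top = []
--     answer = []
--     for s in score:
--         lo, hi = 0, len(top)
--         while lo < hi:
--             mid = (lo + hi) // 2
--             if top[mid] <= s:
--                 lo = mid + 1
--             else:
--                 hi = mid
--         top.insert(lo, s)
--         if len(top) > k:
--             del top[0]
--         answer.append(top[0])
--     return answer
-- ===== Notes on version B (the rewrite author's own statement) =====
-- stated objective: faster
-- what changed: Instead of rescanning the whole pool with min() (twice) and remove() each step, B maintains the top-k scores as a sorted list, inserts each score at its binary-searched position, drops the smallest on overflow, and reads the answer off the first element.
import Mathlib
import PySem

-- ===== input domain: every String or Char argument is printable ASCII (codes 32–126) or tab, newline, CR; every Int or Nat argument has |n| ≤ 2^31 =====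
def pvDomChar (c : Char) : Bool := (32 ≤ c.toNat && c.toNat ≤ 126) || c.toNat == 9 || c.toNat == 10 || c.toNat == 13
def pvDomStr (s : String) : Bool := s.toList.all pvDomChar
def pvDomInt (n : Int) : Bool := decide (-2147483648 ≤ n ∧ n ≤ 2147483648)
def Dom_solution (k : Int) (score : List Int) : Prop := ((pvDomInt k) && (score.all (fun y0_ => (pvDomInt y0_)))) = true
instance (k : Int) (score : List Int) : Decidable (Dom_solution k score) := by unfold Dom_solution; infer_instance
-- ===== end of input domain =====

-- B replaces A's per-step min()/min()/remove() rescans of the pool by a sorted top-k list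
-- with binary-searched insertion (objective: faster by a constant factor, same per-step asymptotics at C level).

-- ===== PORT A =====
-- One iteration of A's loop body; `none` marks Python's ValueError (min of an empty list).
def solStepA (k : Int) (st : List Int × List Int) (s : Int) : Option (List Int × List Int) :=
  let answer := st.1
  let ranking := st.2
  if (ranking.length : Int) < k then
    let ranking := ranking ++ [s]
    match PySem.List.min? ranking (fun y => y) with
    | none => none
    | some m => some (answer ++ [m], ranking)
  else
    let ranking := ranking ++ [s]
    match PySem.List.min? ranking (fun y => y) with
    | none => none
    | some m =>
      match PySem.List.remove? ranking m with
      | none => none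
      | some ranking =>
        match PySem.List.min? ranking (fun y => y) with
        | none => none
        | some m2 => some (answer ++ [m2], ranking)

def solution (k : Int) (score : List Int) : List Int :=
  match score.foldlM (solStepA k) ([], []) with
  | some st => st.1
  | none => []   -- unreachable under Pre_solution (Python raises here)

-- ===== PORT B =====
-- B's while-loop binary search for the insertion point (indices are provably in range,
-- so the Nat-indexed getD transcription is exact).
def solFindAux (top : List Int) (s : Int) : Nat → Nat → Nat → Nat
  | 0, lo, _hi => lo   -- fuel exhausted: only reached once lo = hi, the loop's exit condition
  | fuel + 1, lo, hi =>
    if lo < hi then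
      let mid := (lo + hi) / 2
      if top.getD mid 0 ≤ s then solFindAux top s fuel (mid + 1) hi
      else solFindAux top s fuel lo mid
    else lo

-- hi - lo shrinks by at least one per iteration, so that much fuel is exact.
def solFind (top : List Int) (s : Int) (lo hi : Nat) : Nat := solFindAux top s (hi - lo) lo hi

-- One iteration of B's loop body; `none` marks Python's IndexError (top[0] on an empty list).
def solStepB (k : Int) (st : List Int × List Int) (s : Int) : Option (List Int × List Int) :=
  let answer := st.1
  let top := st.2
  let lo := solFind top s 0 top.length
  let top := PySem.List.insert top (lo : Int) s
  let top := if (top.length : Int) > k then top.drop 1 else top   -- del top[0]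
  match top with
  | [] => none
  | m :: rest => some (answer ++ [m], m :: rest)

def solution_alt (k : Int) (score : List Int) : List Int :=
  match score.foldlM (solStepB k) ([], []) with
  | some st => st.1
  | none => []   -- unreachable under Pre_solution (Python raises here)

-- ===== PRECONDITION & SPEC =====
-- Pre_ excludes exactly the inputs where A raises: with k ≤ 0 and a nonempty score,
-- A's first iteration empties the pool and calls min([]) (ValueError); B raises IndexError there too.
def Pre_solution (k : Int) (score : List Int) : Prop := 1 ≤ k ∨ score = []
instance (k : Int) (score : List Int) : Decidable (Pre_solution k score) := by unfold Pre_solution; infer_instance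
def pvWitness_solution : Int × List Int := (2, [10, 20, 5, 30])

def Spec_solution (k : Int) (score : List Int) (out : List Int) : Prop := out = solution_alt k score
instance (k : Int) (score : List Int) (out : List Int) : Decidable (Spec_solution k score out) := by unfold Spec_solution; infer_instance

-- ===== CLAIM (what is proved, stated in full; the proofs are below) =====
def Claim_equal_solution : Prop := ∀ (k : Int) (score : List Int), Dom_solution k score → Pre_solution k score → Spec_solution k score (solution k score)


-- ===== LEMMAS AND PROOFS =====

-- Correctness of B's binary search: on a sorted list it returns a position p with
-- everything before p ≤ s and everything from p on > s.
lemma solFindAux_spec (top : List Int) (s : Int) (hsort : List.Pairwise (· ≤ ·) top) :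
    ∀ (fuel lo hi : Nat), hi - lo ≤ fuel → lo ≤ hi → hi ≤ top.length →
    (∀ i, i < lo → top.getD i 0 ≤ s) →
    (∀ i, hi ≤ i → i < top.length → s < top.getD i 0) →
    lo ≤ solFindAux top s fuel lo hi ∧ solFindAux top s fuel lo hi ≤ hi ∧
    (∀ i, i < solFindAux top s fuel lo hi → top.getD i 0 ≤ s) ∧
    (∀ i, solFindAux top s fuel lo hi ≤ i → i < top.length → s < top.getD i 0) := by
  intro fuel
  induction fuel with
  | zero =>
    intro lo hi hf hlh hhl hlow hhigh
    simp only [solFindAux]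
    exact ⟨le_refl _, hlh, hlow, fun i hi1 hi2 => hhigh i (by omega) hi2⟩
  | succ n ih =>
    intro lo hi hf hlh hhl hlow hhigh
    by_cases hlt : lo < hi
    · have hmidlt : (lo + hi) / 2 < hi := by omega
      have hmidge : lo ≤ (lo + hi) / 2 := by omega
      have hstep : solFindAux top s (n + 1) lo hi =
          if top.getD ((lo + hi) / 2) 0 ≤ s then solFindAux top s n ((lo + hi) / 2 + 1) hi
          else solFindAux top s n lo ((lo + hi) / 2) := by
        rw [solFindAux, if_pos hlt]
      by_cases hc : top.getD ((lo + hi) / 2) 0 ≤ s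
      · rw [hstep, if_pos hc]
        have hlow' : ∀ i, i < (lo + hi) / 2 + 1 → top.getD i 0 ≤ s := by
          intro i hi1
          by_cases hil : i < lo
          · exact hlow i hil
          · have hi2 : i < top.length := by omega
            have hm2 : (lo + hi) / 2 < top.length := by omega
            rcases Nat.lt_or_ge i ((lo + hi) / 2) with h | h
            · have := (List.pairwise_iff_getElem.mp hsort) i ((lo + hi) / 2) hi2 hm2 h
              rw [List.getD_eq_getElem top 0 hi2]
              rw [List.getD_eq_getElem top 0 hm2] at hc
              exact le_trans this hc
            · have : i = (lo + hi) / 2 := by omega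
              rw [this]; exact hc
        have h := ih ((lo + hi) / 2 + 1) hi (by omega) (by omega) hhl hlow' hhigh
        exact ⟨by omega, h.2.1, h.2.2.1, h.2.2.2⟩
      · rw [hstep, if_neg hc]
        rw [not_le] at hc
        have hhigh' : ∀ i, (lo + hi) / 2 ≤ i → i < top.length → s < top.getD i 0 := by
          intro i hi1 hi2
          have hm2 : (lo + hi) / 2 < top.length := by omega
          rcases Nat.lt_or_ge ((lo + hi) / 2) i with h | h
          · have := (List.pairwise_iff_getElem.mp hsort) ((lo + hi) / 2) i hm2 hi2 h
            rw [List.getD_eq_getElem top 0 hi2]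
            rw [List.getD_eq_getElem top 0 hm2] at hc
            exact lt_of_lt_of_le hc this
          · have : i = (lo + hi) / 2 := by omega
            rw [this]; exact hc
        have h := ih lo ((lo + hi) / 2) (by omega) hmidge (by omega) hlow hhigh'
        exact ⟨h.1, by omega, h.2.2.1, fun i hi1 hi2 => h.2.2.2 i hi1 hi2⟩
    · rw [solFindAux, if_neg hlt]
      exact ⟨le_refl _, hlh, hlow, fun i hi1 hi2 => hhigh i (by omega) hi2⟩

-- Inserting s at such a position keeps the list sorted and adds exactly s to the multiset.
lemma insert_sorted_perm (top : List Int) (s : Int) (p : Nat)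
    (hsort : List.Pairwise (· ≤ ·) top) (hp : p ≤ top.length)
    (hle : ∀ i, i < p → top.getD i 0 ≤ s)
    (hgt : ∀ i, p ≤ i → i < top.length → s < top.getD i 0) :
    List.Pairwise (· ≤ ·) (top.take p ++ s :: top.drop p) ∧
    (top.take p ++ s :: top.drop p).Perm (s :: top) := by
  constructor
  · rw [List.pairwise_append]
    refine ⟨hsort.sublist (List.take_sublist p top), ?_, ?_⟩
    · rw [List.pairwise_cons]
      refine ⟨?_, hsort.sublist (List.drop_sublist p top)⟩
      intro b hb
      obtain ⟨j, hj, hbj⟩ := List.mem_iff_getElem.mp hb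
      have hj' : p + j < top.length := by
        have := hj; rw [List.length_drop] at this; omega
      have hgd := hgt (p + j) (by omega) hj'
      rw [List.getD_eq_getElem top 0 hj'] at hgd
      rw [← hbj, List.getElem_drop]
      exact le_of_lt hgd
    · intro a ha b hb
      obtain ⟨i, hi, hai⟩ := List.mem_iff_getElem.mp ha
      have hi' : i < p := by
        have := hi; rw [List.length_take] at this; omega
      have hi'' : i < top.length := by omega
      have hals : a ≤ s := by
        have := hle i hi'
        rw [List.getD_eq_getElem top 0 hi''] at this
        rw [← hai, List.getElem_take]
        exact this
      rcases List.mem_cons.mp hb with rfl | hb'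
      · exact hals
      · obtain ⟨j, hj, hbj⟩ := List.mem_iff_getElem.mp hb'
        have hj' : p + j < top.length := by
          have := hj; rw [List.length_drop] at this; omega
        have := (List.pairwise_iff_getElem.mp hsort) i (p + j) hi'' hj' (by omega)
        rw [← hai, ← hbj, List.getElem_take, List.getElem_drop]
        exact this
  · have h := List.perm_middle (a := s) (l₁ := top.take p) (l₂ := top.drop p)
    rwa [List.take_append_drop] at h

-- Python's min() on any rearrangement of a sorted nonempty list is its head.
lemma min?_of_sorted_perm (r t : List Int) (m : Int)
    (hperm : r.Perm (m :: t)) (hsort : List.Pairwise (· ≤ ·) (m :: t)) :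
    PySem.List.min? r (fun y => y) = some m := by
  have hne : r ≠ [] := by
    intro h; subst h; exact (List.cons_ne_nil m t) hperm.symm.eq_nil
  cases hmin : PySem.List.min? r (fun y => y) with
  | none => exact absurd ((PySem.List.min?_eq_none_iff r (fun y => y)).mp hmin) hne
  | some v =>
    have hvr : v ∈ r := PySem.List.min?_mem hmin
    have hvm : v ∈ m :: t := hperm.mem_iff.mp hvr
    have hmr : m ∈ r := hperm.mem_iff.mpr (List.mem_cons_self)
    have hvle : v ≤ m := PySem.List.min?_isMin hmin m hmr
    have hmle : m ≤ v := by
      rcases List.mem_cons.mp hvm with rfl | hv'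
      · exact le_refl v
      · exact (List.pairwise_cons.mp hsort).1 v hv'
    rw [le_antisymm hvle hmle]

-- The main loop invariant: A's pool is a permutation of B's sorted top list and
-- both loops have produced the same answers so far.
lemma solution_loop (k : Int) (hk : 1 ≤ k) (sc : List Int) :
    ∀ (ans r b : List Int), List.Pairwise (· ≤ ·) b → r.Perm b → (r.length : Int) ≤ k →
    ∃ (a' r' b' : List Int),
      List.foldlM (solStepA k) (ans, r) sc = some (a', r') ∧
      List.foldlM (solStepB k) (ans, b) sc = some (a', b') := by
  induction sc with
  | nil =>
    intro ans r b _ _ _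
    exact ⟨ans, r, b, rfl, rfl⟩
  | cons s sc ih =>
    intro ans r b hsort hperm hlen
    have hrb : r.length = b.length := hperm.length_eq
    -- B's binary search and insertion
    set p := solFind b s 0 b.length with hp
    have hspec : 0 ≤ p ∧ p ≤ b.length ∧ (∀ i, i < p → b.getD i 0 ≤ s) ∧
        (∀ i, p ≤ i → i < b.length → s < b.getD i 0) := by
      rw [hp]
      simp only [solFind]
      exact solFindAux_spec b s hsort (b.length - 0) 0 b.length (by omega) (by omega)
        b.length.le_refl (by intro i h; omega) (by intro i h1 h2; omega)
    have hple : p ≤ b.length := hspec.2.1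
    have hins : PySem.List.insert b (p : Int) s = b.take p ++ s :: b.drop p :=
      PySem.List.insert_natCast b p s hple
    obtain ⟨hTsort, hTperm⟩ :=
      insert_sorted_perm b s p hsort hple hspec.2.2.1 hspec.2.2.2
    set T := b.take p ++ s :: b.drop p with hTdef
    have hTlen : T.length = b.length + 1 := by
      have := hTperm.length_eq; simpa using this
    obtain ⟨m, t, hT⟩ : ∃ m t, T = m :: t := by
      cases hcT : T with
      | nil => rw [hcT] at hTlen; simp at hTlen
      | cons x xs => exact ⟨x, xs, rfl⟩
    have hr1 : (r ++ [s]).Perm T :=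
      ((List.perm_append_singleton s r).trans (hperm.cons s)).trans hTperm.symm
    have hmin1 : PySem.List.min? (r ++ [s]) (fun y => y) = some m :=
      min?_of_sorted_perm (r ++ [s]) t m (by rwa [hT] at hr1) (by rwa [hT] at hTsort)
    by_cases hcase : (r.length : Int) < k
    · -- pool still below capacity: both sides just insert
      have hA : solStepA k (ans, r) s = some (ans ++ [m], r ++ [s]) := by
        simp only [solStepA, if_pos hcase, hmin1]
      have hnotgt : ¬ ((T.length : Int) > k) := by
        rw [hTlen]; push_cast; omega
      have hB : solStepB k (ans, b) s = some (ans ++ [m], m :: t) := by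
        have hng : ¬ (((m :: t).length : Int) > k) := hT ▸ hnotgt
        simp only [solStepB, ← hp, hins, hT, if_neg hng]
      rw [List.foldlM_cons, hA, List.foldlM_cons, hB]
      exact ih (ans ++ [m]) (r ++ [s]) (m :: t) (by rwa [hT] at hTsort)
        (by rwa [hT] at hr1) (by simp; omega)
    · -- pool at capacity: A removes its min, B drops the head
      have hmT : m ∈ r ++ [s] := hr1.mem_iff.mpr (by rw [hT]; exact List.mem_cons_self)
      have hrem : PySem.List.remove? (r ++ [s]) m = some ((r ++ [s]).erase m) :=
        PySem.List.remove?_eq_some_erase (r ++ [s]) m hmT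
      have hr2 : ((r ++ [s]).erase m).Perm t := by
        have := hr1.erase m
        rwa [hT, List.erase_cons_head] at this
      have htlen : t.length = r.length := by
        have h1 := hT ▸ hTlen
        simp at h1; omega
      obtain ⟨m2, t2, ht⟩ : ∃ m2 t2, t = m2 :: t2 := by
        cases hct : t with
        | nil => rw [hct] at htlen; simp at htlen; omega
        | cons x xs => exact ⟨x, xs, rfl⟩
      have htsort : List.Pairwise (· ≤ ·) t := (List.pairwise_cons.mp (hT ▸ hTsort)).2
      have hmin2 : PySem.List.min? ((r ++ [s]).erase m) (fun y => y) = some m2 :=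
        min?_of_sorted_perm _ t2 m2 (by rwa [ht] at hr2) (by rwa [ht] at htsort)
      have hA : solStepA k (ans, r) s = some (ans ++ [m2], (r ++ [s]).erase m) := by
        simp only [solStepA, if_neg hcase, hmin1, hrem, hmin2]
      have hgt : (T.length : Int) > k := by
        rw [hTlen]; push_cast; omega
      have hB : solStepB k (ans, b) s = some (ans ++ [m2], m2 :: t2) := by
        have hg : (((m :: m2 :: t2).length : Int) > k) := by
          have h := hT ▸ hgt; rwa [ht] at h
        simp only [solStepB, ← hp, hins, hT, ht, if_pos hg, List.drop_one, List.tail_cons]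
      rw [List.foldlM_cons, hA, List.foldlM_cons, hB]
      have herlen : ((r ++ [s]).erase m).length = r.length := by
        rw [List.length_erase_of_mem hmT]; simp
      exact ih (ans ++ [m2]) ((r ++ [s]).erase m) (m2 :: t2)
        (by rwa [ht] at htsort) (by rwa [ht] at hr2) (by rw [herlen]; omega)

-- ===== VERDICT (by name: the statement is the Claim_ definition above) =====
theorem solution_spec : Claim_equal_solution := by
  intro k score _ hpre
  unfold Spec_solution
  rcases hpre with hk | hsc
  · obtain ⟨a', r', b', hA, hB⟩ := solution_loop k hk score [] [] []
      List.Pairwise.nil (List.Perm.refl []) (by simp; omega)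
    unfold solution solution_alt
    rw [hA, hB]
  · subst hsc; rfl
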